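-- pv_equiv track=rewrite | github.com/data-IA-2023/vocal_weather_north_scorers | app/text_recognition.py | virgule
-- ===== SOURCE A (Python) =====
-- def virgule(a):
--     b=""
--     a = a.lower().replace('\xa0', '')
--     for carac in a:
--         if carac==',' or carac== ';' or carac== '.' or carac== '?' or carac== '!':
--             b+=' , '
--         else:
--             b+=carac
--     return b
-- ===== SOURCE B (Python) =====
-- def virgule(a):
--     a = a.lower().replace('\xa0', '')
--     a = a.replace(',', ' , ')  # must come first: ' , ' itself contains a comma
--     a = a.replace(';', ' , ')
--     a = a.replace('.', ' , ')
--     a = a.replace('?', ' , ')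
--     a = a.replace('!', ' , ')
--     return a
-- ===== Notes on version B (the rewrite author's own statement) =====
-- stated objective: idiomatic
-- what changed: A's explicit character-by-character loop with a string accumulator is replaced by a chain of five whole-string str.replace passes (comma first, since the replacement ' , ' contains a comma).
import Mathlib
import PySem

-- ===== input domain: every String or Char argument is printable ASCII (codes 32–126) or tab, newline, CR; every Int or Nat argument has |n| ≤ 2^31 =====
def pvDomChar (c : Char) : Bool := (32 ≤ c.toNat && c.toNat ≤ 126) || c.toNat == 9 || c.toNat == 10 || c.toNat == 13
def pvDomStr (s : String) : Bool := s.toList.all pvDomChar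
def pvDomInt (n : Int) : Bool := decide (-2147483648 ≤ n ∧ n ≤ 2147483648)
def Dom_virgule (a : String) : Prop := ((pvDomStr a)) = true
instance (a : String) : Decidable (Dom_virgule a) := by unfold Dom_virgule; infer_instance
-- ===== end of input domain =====

-- B replaces A's character-by-character accumulation loop with a chain of five whole-string
-- replace passes (comma first, since the replacement ' , ' itself contains a comma); objective: idiomatic.

-- ===== PORT A =====
def virgule (a : String) : String :=
  let a := PySem.Str.replace (PySem.Str.lower a) "\u00A0" ""
  a.toList.foldl
    (fun b carac =>
      if carac = ',' ∨ carac = ';' ∨ carac = '.' ∨ carac = '?' ∨ carac = '!' then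
        b ++ " , "
      else
        b ++ carac.toString)
    ""

-- ===== PORT B =====
def virgule_alt (a : String) : String :=
  let a1 := PySem.Str.replace (PySem.Str.lower a) "\u00A0" ""
  let a2 := PySem.Str.replace a1 "," " , "
  let a3 := PySem.Str.replace a2 ";" " , "
  let a4 := PySem.Str.replace a3 "." " , "
  let a5 := PySem.Str.replace a4 "?" " , "
  PySem.Str.replace a5 "!" " , "

-- ===== PRECONDITION & SPEC =====
def Spec_virgule (a : String) (out : String) : Prop := out = virgule_alt a
instance (a : String) (out : String) : Decidable (Spec_virgule a out) := by unfold Spec_virgule; infer_instance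

-- ===== CLAIM (what is proved, stated in full; the proofs are below) =====
def Claim_equal_virgule : Prop := ∀ (a : String), Dom_virgule a → Spec_virgule a (virgule a)

-- ===== LEMMAS AND PROOFS =====

-- single-character substitution as a flatMap
def pvSub (p : Char) (new : List Char) (c : Char) : List Char := if c = p then new else [c]

theorem pv_go_single (p : Char) (new : List Char) :
    ∀ (l acc : List Char) (fuel : Nat), l.length ≤ fuel →
      PySem.Chars.replace.go [p] new fuel l acc = acc.reverse ++ l.flatMap (pvSub p new) := by
  intro l
  induction l with
  | nil =>
    intro acc fuel _
    cases fuel <;> simp [PySem.Chars.replace.go]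
  | cons c t ih =>
    intro acc fuel hf
    cases fuel with
    | zero => simp at hf
    | succ f =>
      rw [PySem.Chars.replace.go]
      by_cases hc : c = p
      · subst hc
        have hpre : [c].isPrefixOf (c :: t) = true := by simp [List.isPrefixOf]
        rw [if_pos hpre]
        simp only [List.length_singleton, List.drop_succ_cons, List.drop_zero]
        rw [ih (new.reverse ++ acc) f (by simpa using Nat.le_of_succ_le_succ hf)]
        simp [pvSub, List.flatMap_cons]
      · have hpre : [p].isPrefixOf (c :: t) = false := by
          simp [List.isPrefixOf]
          exact fun h => (hc h.symm).elim
        rw [if_neg (by simp [hpre])]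
        rw [ih (c :: acc) f (by simpa using Nat.le_of_succ_le_succ hf)]
        simp [pvSub, List.flatMap_cons, hc]

theorem pv_replace_single (l : List Char) (p : Char) (new : List Char) :
    PySem.Chars.replace l [p] new = l.flatMap (pvSub p new) := by
  simpa [PySem.Chars.replace] using pv_go_single p new l [] l.length le_rfl

-- A's loop, on the list side
theorem pv_foldA (l : List Char) (b : String) :
    (l.foldl
      (fun b carac =>
        if carac = ',' ∨ carac = ';' ∨ carac = '.' ∨ carac = '?' ∨ carac = '!' then
          b ++ " , "
        else
          b ++ carac.toString) b).toList
    = b.toList ++ l.flatMap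
        (fun c => if c = ',' ∨ c = ';' ∨ c = '.' ∨ c = '?' ∨ c = '!' then [' ', ',', ' '] else [c]) := by
  induction l generalizing b with
  | nil => simp
  | cons c t ih =>
    simp only [List.foldl_cons, List.flatMap_cons]
    by_cases h : c = ',' ∨ c = ';' ∨ c = '.' ∨ c = '?' ∨ c = '!'
    · rw [if_pos h, ih]
      simp [h]
    · rw [if_neg h, ih]
      simp [h]

-- composing the five single-character substitutions, per character
theorem pv_compose_char (c : Char) :
    (pvSub ',' [' ', ',', ' '] c).flatMap (fun x =>
      (pvSub ';' [' ', ',', ' '] x).flatMap (fun x =>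
        (pvSub '.' [' ', ',', ' '] x).flatMap (fun x =>
          (pvSub '?' [' ', ',', ' '] x).flatMap (pvSub '!' [' ', ',', ' ']))))
    = (if c = ',' ∨ c = ';' ∨ c = '.' ∨ c = '?' ∨ c = '!' then [' ', ',', ' '] else [c]) := by
  by_cases h1 : c = ','
  · subst h1; decide
  by_cases h2 : c = ';'
  · subst h2; decide
  by_cases h3 : c = '.'
  · subst h3; decide
  by_cases h4 : c = '?'
  · subst h4; decide
  by_cases h5 : c = '!'
  · subst h5; decide
  simp [pvSub, h1, h2, h3, h4, h5]

theorem pv_toList_eq (s t : String) (h : s.toList = t.toList) : s = t := by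
  have := congrArg String.ofList h
  simpa using this

theorem pv_flatMap_assoc {α β γ : Type} (l : List α) (f : α → List β) (g : β → List γ) :
    (l.flatMap f).flatMap g = l.flatMap (fun x => (f x).flatMap g) := by
  induction l with
  | nil => rfl
  | cons c t ih => simp [List.flatMap_cons, ih]

theorem pv_flatMap_congr {α β : Type} (l : List α) (f g : α → List β)
    (h : ∀ c, f c = g c) : l.flatMap f = l.flatMap g := by
  induction l with
  | nil => rfl
  | cons c t ih => simp [List.flatMap_cons, h c, ih]

-- ===== VERDICT (by name: the statement is the Claim_ definition above) =====
theorem virgule_spec : Claim_equal_virgule := by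
  intro a _
  unfold Spec_virgule virgule virgule_alt
  apply pv_toList_eq
  simp only [PySem.Str.toList_replace]
  have e1 : (",".toList) = [','] := by decide
  have e2 : (";".toList) = [';'] := by decide
  have e3 : (".".toList) = ['.'] := by decide
  have e4 : ("?".toList) = ['?'] := by decide
  have e5 : ("!".toList) = ['!'] := by decide
  have eR : (" , ".toList) = [' ', ',', ' '] := by decide
  have e0 : ("".toList : List Char) = [] := by decide
  rw [pv_foldA, e1, e2, e3, e4, e5, eR,
      pv_replace_single, pv_replace_single, pv_replace_single, pv_replace_single,
      pv_replace_single, e0,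
      pv_flatMap_assoc, pv_flatMap_assoc, pv_flatMap_assoc, pv_flatMap_assoc]
  simp only [List.nil_append]
  exact (pv_flatMap_congr _ _ _ (fun c => pv_compose_char c)).symm
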